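-- pv_equiv track=rewrite | github.com/SikolenkoMaxim/barapost | barapost/src/sorter_modules/sorter_spec.py | find_rank_for_filename
-- ===== SOURCE A (Python) =====
-- ranks = ("superkingdom", "phylum", "class", "order", "family", "genus", "species")
--
-- def find_rank_for_filename(sens, taxonomy):
--     """
--     Function forms name of sorted file according to annotation and sorting sensitivity.
--
--     :param sens: sorting sensitivity;
--     :type sens: tuple<str, int>;
--     :param taxonomy: taxonomy from taxopnomy file;
--     :type taxonomy: tuple<tuple<str>>;
--     """
--     rank_name = sens[0]
--     rank_num = sens[1]
--
--     if taxonomy[rank_num][1] != "":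
--         # If we've got rank that we need -- return it
--         return taxonomy[rank_num][1]
--     else:
--         # Otherwise -- recursively go up to the root of taxonomy tree
--         new_sens = (ranks[rank_num-1], rank_num-1)
--         return find_rank_for_filename( new_sens, taxonomy ) + ";no_{}".format(rank_name)
-- ===== SOURCE B (Python) =====
-- ranks = ("superkingdom", "phylum", "class", "order", "family", "genus", "species")
--
-- def find_rank_for_filename(sens, taxonomy):
--     """Staged re-implementation: first scan upward to find the distance k to the
--     nearest non-empty rank, then assemble the name from k with a comprehension."""
--     num = sens[1]
--     k = 0
--     while taxonomy[num - k][1] == "":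
--         k += 1
--     base = taxonomy[num - k][1]
--     if k == 0:
--         return base
--     names = [sens[0]] + [ranks[num - j] for j in range(1, k)]
--     return base + "".join(";no_{}".format(n) for n in reversed(names))
-- ===== Notes on version B (the rewrite author's own statement) =====
-- stated objective: alternative
-- what changed: Replaced the recursion by two staged passes: a counting loop that only finds the distance k to the nearest non-empty rank, then a range comprehension that rebuilds the skipped rank names from k and joins the ';no_<name>' suffixes in reversed order.
import Mathlib
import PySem

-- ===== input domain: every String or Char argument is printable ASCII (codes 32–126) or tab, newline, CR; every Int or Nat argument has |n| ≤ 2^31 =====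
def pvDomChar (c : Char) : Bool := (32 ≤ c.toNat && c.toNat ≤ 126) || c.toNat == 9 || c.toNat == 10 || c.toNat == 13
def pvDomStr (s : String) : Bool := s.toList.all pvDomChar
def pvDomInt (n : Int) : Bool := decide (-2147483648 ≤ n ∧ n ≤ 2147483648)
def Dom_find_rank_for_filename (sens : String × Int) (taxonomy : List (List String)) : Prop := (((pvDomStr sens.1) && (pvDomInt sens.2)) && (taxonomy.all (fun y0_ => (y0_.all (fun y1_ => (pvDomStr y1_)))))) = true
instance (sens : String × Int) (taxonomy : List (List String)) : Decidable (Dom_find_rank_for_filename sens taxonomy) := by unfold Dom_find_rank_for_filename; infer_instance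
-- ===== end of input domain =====

-- B replaces A's recursion by two staged passes: a counting loop that finds the
-- distance k to the nearest non-empty rank, then a range comprehension rebuilding
-- the skipped names from k (alternative, same cost).

def ranksL : List String :=
  ["superkingdom", "phylum", "class", "order", "family", "genus", "species"]

-- ===== PORT A =====
-- A raises IndexError on out-of-range accesses; the 'none' branches (default "")
-- are exactly those inputs, and Pre_ excludes them.  The recursion descends on
-- the index num, so it is totalised with the fuel (num + len + 1).toNat: fuel 0
-- is only reached when taxonomy[num] is out of range, where Python raises and
-- the port returns the same "" the none-branch returns.
def findA (taxonomy : List (List String)) : Nat → String → Int → String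
  | 0, _, _ => ""
  | fuel + 1, name, num =>
    match PySem.List.pyGet? taxonomy num with
    | none => ""
    | some row =>
      match PySem.List.pyGet? row 1 with
      | none => ""
      | some v =>
        if v ≠ "" then v
        else
          match PySem.List.pyGet? ranksL (num - 1) with
          | none => ""
          | some nm => findA taxonomy fuel nm (num - 1) ++ ";no_" ++ name

def find_rank_for_filename (sens : String × Int) (taxonomy : List (List String)) : String :=
  findA taxonomy (sens.2 + taxonomy.length + 1).toNat sens.1 sens.2

-- ===== PORT B =====
-- the counting loop: number of consecutive empty second fields climbing down
-- from index num (none = the scan hits an IndexError, excluded by Pre_);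
-- totalised with the same fuel as the A-side descent.
def findK (taxonomy : List (List String)) : Nat → Int → Option Nat
  | 0, _ => none
  | fuel + 1, num =>
    match PySem.List.pyGet? taxonomy num with
    | none => none
    | some row =>
      match PySem.List.pyGet? row 1 with
      | none => none
      | some v => if v == "" then (findK taxonomy fuel (num - 1)).map (· + 1) else some 0

def find_rank_for_filename_alt (sens : String × Int) (taxonomy : List (List String)) : String :=
  match findK taxonomy (sens.2 + taxonomy.length + 1).toNat sens.2 with
  | none => ""
  | some k =>
    let base := (PySem.List.pyGet? ((PySem.List.pyGet? taxonomy (sens.2 - k)).getD []) 1).getD ""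
    if k == 0 then base
    else
      let names := (sens.1 :: (PySem.List.pyRange 1 k 1).map
        (fun j => (PySem.List.pyGet? ranksL (sens.2 - j)).getD "")).reverse
      base ++ String.join (names.map (fun n => ";no_" ++ n))

-- ===== PRECONDITION & SPEC =====
-- entry2 taxonomy i = taxonomy[i][1] (none = IndexError)
def entry2 (taxonomy : List (List String)) (i : Int) : Option String :=
  (PySem.List.pyGet? taxonomy i).bind (fun row => PySem.List.pyGet? row 1)

-- the climb from level num succeeds after exactly k steps: k empty entries
-- (with the rank names available), then a non-empty one
def PreChain (taxonomy : List (List String)) (num : Int) (k : Nat) : Prop :=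
  (∀ j < k, entry2 taxonomy (num - j) = some "" ∧
      (PySem.List.pyGet? ranksL (num - j - 1)).isSome) ∧
  (∃ v, entry2 taxonomy (num - k) = some v ∧ v ≠ "")

-- Pre_ = exactly the inputs on which Python A returns (no IndexError anywhere
-- along the climb): some level at or above sens.2 has a non-empty second field,
-- every level passed on the way is a valid (possibly negative) index with ≥ 2
-- fields and an available rank name.  (A chain of accesses stays inside
-- [-len, len), so its length is at most 2·len: the bound loses no input A
-- returns on and keeps the condition quickly decidable.)
def Pre_find_rank_for_filename (sens : String × Int) (taxonomy : List (List String)) : Prop :=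
  ∃ k : Nat, k ≤ 2 * taxonomy.length ∧ PreChain taxonomy sens.2 k

instance (sens : String × Int) (taxonomy : List (List String)) :
    Decidable (Pre_find_rank_for_filename sens taxonomy) := by
  unfold Pre_find_rank_for_filename PreChain entry2; infer_instance

def pvWitness_find_rank_for_filename : (String × Int) × List (List String) :=
  (("genus", 1), [["d", "Bacteria"], ["p", ""]])

def Spec_find_rank_for_filename (sens : String × Int) (taxonomy : List (List String)) (out : String) : Prop := out = find_rank_for_filename_alt sens taxonomy
instance (sens : String × Int) (taxonomy : List (List String)) (out : String) : Decidable (Spec_find_rank_for_filename sens taxonomy out) := by unfold Spec_find_rank_for_filename; infer_instance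

-- ===== CLAIM (what is proved, stated in full; the proofs are below) =====
def Claim_equal_find_rank_for_filename : Prop := ∀ (sens : String × Int) (taxonomy : List (List String)), Dom_find_rank_for_filename sens taxonomy → Pre_find_rank_for_filename sens taxonomy → Spec_find_rank_for_filename sens taxonomy (find_rank_for_filename sens taxonomy)

-- ===== LEMMAS AND PROOFS =====

-- the list of skipped rank names, outermost level first (proof-side spec)
def specNames (num : Int) (k : Nat) (name : String) : List String :=
  match k with
  | 0 => []
  | k + 1 => specNames (num - 1) k ((PySem.List.pyGet? ranksL (num - 1)).getD "") ++ [name]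

lemma chain_tail (taxonomy : List (List String)) (num : Int) (k : Nat)
    (h : PreChain taxonomy num (k + 1)) : PreChain taxonomy (num - 1) k := by
  obtain ⟨hall, hsucc⟩ := h
  constructor
  · intro j hj
    have := hall (j + 1) (by omega)
    have e : num - ((j : Int) + 1) = num - 1 - j := by ring
    simpa [e] using this
  · obtain ⟨v, hv, hne⟩ := hsucc
    refine ⟨v, ?_, hne⟩
    have e : num - ((k : Int) + 1) = num - 1 - k := by ring
    simpa [e] using hv

-- A's value, characterised via specNames (fuel only needs to dominate the chain)
lemma A_go_eq (taxonomy : List (List String)) :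
    ∀ (k fuel : Nat) (num : Int) (name : String), k < fuel → PreChain taxonomy num k →
      findA taxonomy fuel name num =
        (entry2 taxonomy (num - k)).getD "" ++
          String.join ((specNames num k name).map (fun n => ";no_" ++ n)) := by
  intro k
  induction k with
  | zero =>
    intro fuel num name hf h
    obtain ⟨_, v, hv, hne⟩ := h
    have hv' := hv
    simp only [Nat.cast_zero, Int.sub_zero, entry2, Option.bind_eq_some_iff] at hv'
    obtain ⟨row, hrow, h1⟩ := hv'
    cases fuel with
    | zero => omega
    | succ fuel =>
      simp [findA, hrow, h1, hne, specNames, String.join, entry2, hv]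
  | succ k ih =>
    intro fuel num name hf h
    have h0 := h.1 0 (Nat.succ_pos k)
    simp only [Nat.cast_zero, Int.sub_zero, entry2, Option.bind_eq_some_iff] at h0
    obtain ⟨⟨row, hrow, h1⟩, hrk⟩ := h0
    obtain ⟨nm, hnm⟩ := Option.isSome_iff_exists.mp hrk
    cases fuel with
    | zero => omega
    | succ fuel =>
      have hrec := ih fuel (num - 1) nm (by omega) (chain_tail taxonomy num k h)
      have e : num - 1 - (k : Int) = num - ((k : Int) + 1) := by ring
      simp [findA, hrow, h1, hnm, hrec, specNames, e, String.join, String.append_assoc]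

-- the counting loop finds exactly the chain length
lemma K_go_eq (taxonomy : List (List String)) :
    ∀ (k fuel : Nat) (num : Int), k < fuel → PreChain taxonomy num k →
      findK taxonomy fuel num = some k := by
  intro k
  induction k with
  | zero =>
    intro fuel num hf h
    obtain ⟨_, v, hv, hne⟩ := h
    simp only [Nat.cast_zero, Int.sub_zero, entry2, Option.bind_eq_some_iff] at hv
    obtain ⟨row, hrow, h1⟩ := hv
    cases fuel with
    | zero => omega
    | succ fuel => simp [findK, hrow, h1, hne]
  | succ k ih =>
    intro fuel num hf h
    have h0 := h.1 0 (Nat.succ_pos k)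
    simp only [Nat.cast_zero, Int.sub_zero, entry2, Option.bind_eq_some_iff] at h0
    obtain ⟨⟨row, hrow, h1⟩, _⟩ := h0
    cases fuel with
    | zero => omega
    | succ fuel =>
      simp [findK, hrow, h1, ih fuel (num - 1) (by omega) (chain_tail taxonomy num k h)]

lemma pyRange_shift (a b : Int) :
    PySem.List.pyRange (a + 1) (b + 1) 1 = (PySem.List.pyRange a b 1).map (· + 1) := by
  have e : b + 1 - (a + 1) = b - a := by ring
  simp only [PySem.List.pyRange_one, e, List.map_map]
  apply List.map_congr_left
  intro x _
  simp [Function.comp]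
  ring

-- the comprehension of B equals specNames when every needed rank name is present
lemma names_eq (taxonomy : List (List String)) :
    ∀ (k : Nat) (num : Int) (name : String), PreChain taxonomy num (k + 1) →
      (name :: (PySem.List.pyRange 1 ((k : Int) + 1) 1).map
          (fun j => (PySem.List.pyGet? ranksL (num - j)).getD "")).reverse =
        specNames num (k + 1) name := by
  intro k
  induction k with
  | zero =>
    intro num name _
    simp [specNames, PySem.List.pyRange_one_eq_nil]
  | succ k ih =>
    intro num name h
    have hc : PreChain taxonomy (num - 1) (k + 1) := chain_tail taxonomy num (k + 1) h
    have hsplit : PySem.List.pyRange 1 ((k : Int) + 1 + 1) 1 =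
        1 :: PySem.List.pyRange 2 ((k : Int) + 1 + 1) 1 := by
      apply PySem.List.pyRange_one_cons; omega
    have hshift : PySem.List.pyRange 2 ((k : Int) + 1 + 1) 1 =
        (PySem.List.pyRange 1 ((k : Int) + 1) 1).map (· + 1) := by
      have := pyRange_shift 1 ((k : Int) + 1)
      simpa using this
    have hmap : (PySem.List.pyRange 2 ((k : Int) + 1 + 1) 1).map
        (fun j => (PySem.List.pyGet? ranksL (num - j)).getD "") =
        (PySem.List.pyRange 1 ((k : Int) + 1) 1).map
        (fun j => (PySem.List.pyGet? ranksL (num - 1 - j)).getD "") := by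
      rw [hshift, List.map_map]
      apply List.map_congr_left
      intro x _
      have e : num - (x + 1) = num - 1 - x := by ring
      simp [Function.comp, e]
    have hK : specNames num (k + 1 + 1) name =
        specNames (num - 1) (k + 1) ((PySem.List.pyGet? ranksL (num - 1)).getD "") ++ [name] := rfl
    push_cast
    rw [hsplit]
    simp only [List.map_cons, hmap]
    rw [hK, ← ih (num - 1) ((PySem.List.pyGet? ranksL (num - 1)).getD "") hc]
    simp

-- B's value, characterised via specNames
lemma B_eq (taxonomy : List (List String)) (k fuel : Nat) (num : Int) (name : String)
    (hf : k < fuel) (h : PreChain taxonomy num k) :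
    (match findK taxonomy fuel num with
      | none => ""
      | some k =>
        let base := (PySem.List.pyGet? ((PySem.List.pyGet? taxonomy (num - k)).getD []) 1).getD ""
        if k == 0 then base
        else
          let names := (name :: (PySem.List.pyRange 1 k 1).map
            (fun j => (PySem.List.pyGet? ranksL (num - j)).getD "")).reverse
          base ++ String.join (names.map (fun n => ";no_" ++ n))) =
      (entry2 taxonomy (num - k)).getD "" ++
        String.join ((specNames num k name).map (fun n => ";no_" ++ n)) := by
  rw [K_go_eq taxonomy k fuel num hf h]
  cases k with
  | zero =>
    show (PySem.List.pyGet? ((PySem.List.pyGet? taxonomy (num - ((0 : Nat) : Int))).getD []) 1).getD ""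
        = _
    simp only [specNames, List.map_nil, String.join, List.foldl_nil, entry2, Nat.cast_zero]
    rw [String.append_empty]
    cases hrow : PySem.List.pyGet? taxonomy (num - 0) <;> simp [hrow, PySem.List.pyGet?]
  | succ k =>
    have hn := names_eq taxonomy k num name h
    show (PySem.List.pyGet? ((PySem.List.pyGet? taxonomy (num - ((k + 1 : Nat) : Int))).getD []) 1).getD "" ++
        String.join (((name :: (PySem.List.pyRange 1 ((k + 1 : Nat) : Int) 1).map
          (fun j => (PySem.List.pyGet? ranksL (num - j)).getD "")).reverse).map (fun n => ";no_" ++ n)) = _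
    have hcast : ((k + 1 : Nat) : Int) = (k : Int) + 1 := by push_cast; ring
    rw [hcast, hn]
    congr 1
    simp only [entry2]
    cases hrow : PySem.List.pyGet? taxonomy (num - ((k : Int) + 1)) <;>
      simp [hrow, PySem.List.pyGet?]

-- a successful chain fits under the fuel the ports use
lemma chain_lt_fuel (taxonomy : List (List String)) (num : Int) (k : Nat)
    (h : PreChain taxonomy num k) : k < (num + taxonomy.length + 1).toNat := by
  obtain ⟨_, v, hv, _⟩ := h
  have hne : ¬ (PySem.List.pyGet? taxonomy (num - k) = none) := by
    simp only [entry2, Option.bind_eq_some_iff] at hv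
    obtain ⟨row, hrow, _⟩ := hv
    simp [hrow]
  rw [PySem.List.pyGet?_eq_none_iff] at hne
  simp [PySem.Raise.InRange] at hne
  omega

-- ===== VERDICT (by name: the statement is the Claim_ definition above) =====
theorem find_rank_for_filename_spec : Claim_equal_find_rank_for_filename := by
  intro sens taxonomy _ hPre
  obtain ⟨k, _, hchain⟩ := hPre
  have hf := chain_lt_fuel taxonomy sens.2 k hchain
  unfold Spec_find_rank_for_filename find_rank_for_filename find_rank_for_filename_alt
  rw [A_go_eq taxonomy k _ sens.2 sens.1 hf hchain]
  exact (B_eq taxonomy k _ sens.2 sens.1 hf hchain).symm
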